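-- pv_equiv track=rewrite | github.com/google-research/google-research | ReasoningBank/SWE-Bench/src/minisweagent/agents/interactive_textual.py | _messages_to_steps
-- ===== SOURCE A (Python) =====
-- def _messages_to_steps(messages):
--     """Group messages into "pages" as shown by the UI."""
--     steps = []
--     current_step = []
--     for message in messages:
--         current_step.append(message)
--         if message["role"] == "user":
--             steps.append(current_step)
--             current_step = []
--     if current_step:
--         steps.append(current_step)
--     return steps
-- ===== SOURCE B (Python) =====
-- def _messages_to_steps(messages):
--     """Group messages into "pages" as shown by the UI."""
--     # Phase 1: collect boundary indices (positions of user messages).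
--     boundaries = [i for i, m in enumerate(messages) if m["role"] == "user"]
--     # Phase 2: build the steps by slicing between consecutive boundaries.
--     steps = []
--     start = 0
--     for i in boundaries:
--         steps.append(messages[start:i + 1])
--         start = i + 1
--     if start < len(messages):
--         steps.append(messages[start:])
--     return steps
-- ===== Notes on version B (the rewrite author's own statement) =====
-- stated objective: alternative
-- what changed: Replaces the single running-accumulator pass with a two-phase slicer: first collect the indices of all 'user' messages, then build each step as a slice messages[start:i+1] between consecutive boundaries plus an optional trailing slice.
import Mathlib
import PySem

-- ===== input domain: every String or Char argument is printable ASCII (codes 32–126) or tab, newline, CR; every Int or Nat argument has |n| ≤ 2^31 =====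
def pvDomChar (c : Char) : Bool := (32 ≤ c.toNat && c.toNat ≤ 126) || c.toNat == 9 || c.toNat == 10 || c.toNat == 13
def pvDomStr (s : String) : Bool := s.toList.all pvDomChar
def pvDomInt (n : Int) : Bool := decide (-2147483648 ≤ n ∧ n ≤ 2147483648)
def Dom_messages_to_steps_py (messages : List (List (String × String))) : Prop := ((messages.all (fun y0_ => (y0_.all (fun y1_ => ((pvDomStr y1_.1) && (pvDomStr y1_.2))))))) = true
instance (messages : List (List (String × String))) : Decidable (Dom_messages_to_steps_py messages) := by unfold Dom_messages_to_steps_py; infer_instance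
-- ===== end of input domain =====

-- B replaces A's running-accumulator pass with a two-phase slicer (collect 'user' boundary
-- indices, then cut slices between them); same asymptotic cost, alternative decomposition.
-- Equivalence is about the return value; neither version mutates its argument.

-- ===== PORT A =====
-- m["role"] is a first-match association-list lookup; within Pre_ the key is present,
-- so the `getD ""` default is never the value compared.
def pvIsUser (m : List (String × String)) : Bool :=
  ((m.lookup "role").getD "") == "user"

def messages_to_steps_py (messages : List (List (String × String))) : List (List (List (String × String))) :=
  let st := messages.foldl
    (fun (st : List (List (List (String × String))) × List (List (String × String))) message =>
      let current_step := st.2 ++ [message]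
      if pvIsUser message then (st.1 ++ [current_step], ([] : List (List (String × String))))
      else (st.1, current_step))
    ([], [])
  if st.2.isEmpty then st.1 else st.1 ++ [st.2]

-- ===== PORT B =====
-- boundaries = [i for i, m in enumerate(messages) if m["role"] == "user"]
def pvBoundaries (messages : List (List (String × String))) (start : Int) : List Nat :=
  (PySem.List.enumerate messages start).filterMap
    (fun p => if pvIsUser p.2 then some p.1.toNat else none)

def messages_to_steps_py_alt (messages : List (List (String × String))) : List (List (List (String × String))) :=
  let boundaries := pvBoundaries messages 0
  let st := boundaries.foldl
    (fun (st : List (List (List (String × String))) × Nat) (i : Nat) =>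
      (st.1 ++ [PySem.List.slice messages (some (st.2 : Int)) (some ((i : Int) + 1))], i + 1))
    ([], 0)
  if st.2 < messages.length then
    st.1 ++ [PySem.List.slice messages (some (st.2 : Int)) none]
  else st.1

-- ===== PRECONDITION & SPEC =====
-- Pre_ excludes messages missing the "role" key, on which A raises KeyError.
def Pre_messages_to_steps_py (messages : List (List (String × String))) : Prop :=
  (messages.all (fun m => (m.lookup "role").isSome)) = true
instance (messages : List (List (String × String))) : Decidable (Pre_messages_to_steps_py messages) := by unfold Pre_messages_to_steps_py; infer_instance

def pvWitness_messages_to_steps_py : (List (List (String × String))) :=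
  [[("role", "system"), ("content", "be nice")],
   [("role", "user"), ("content", "hi")],
   [("role", "assistant"), ("content", "hello")]]

def Spec_messages_to_steps_py (messages : List (List (String × String))) (out : List (List (List (String × String)))) : Prop := out = messages_to_steps_py_alt messages
instance (messages : List (List (String × String))) (out : List (List (List (String × String)))) : Decidable (Spec_messages_to_steps_py messages out) := by unfold Spec_messages_to_steps_py; infer_instance

-- ===== CLAIM (what is proved, stated in full; the proofs are below) =====
def Claim_equal_messages_to_steps_py : Prop := ∀ (messages : List (List (String × String))), Dom_messages_to_steps_py messages → Pre_messages_to_steps_py messages → Spec_messages_to_steps_py messages (messages_to_steps_py messages)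

-- ===== LEMMAS AND PROOFS =====

-- Reference grouping function: gRun cur xs = the groups produced from pending prefix cur.
def gRun (cur : List (List (String × String))) : List (List (String × String)) → List (List (List (String × String)))
  | [] => if cur.isEmpty then [] else [cur]
  | m :: rest => if pvIsUser m then (cur ++ [m]) :: gRun [] rest else gRun (cur ++ [m]) rest

-- prepend cur onto the first group (or make it a trailing group).
def consOnto (cur : List (List (String × String))) : List (List (List (String × String))) → List (List (List (String × String)))
  | [] => if cur.isEmpty then [] else [cur]
  | g :: gs => (cur ++ g) :: gs

-- ---- A side ----

theorem A_foldl_eq (msgs : List (List (String × String)))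
    : ∀ (steps : List (List (List (String × String)))) (cur : List (List (String × String))),
      (let st := msgs.foldl
        (fun (st : List (List (List (String × String))) × List (List (String × String))) message =>
          let current_step := st.2 ++ [message]
          if pvIsUser message then (st.1 ++ [current_step], ([] : List (List (String × String))))
          else (st.1, current_step))
        (steps, cur)
       if st.2.isEmpty then st.1 else st.1 ++ [st.2]) = steps ++ gRun cur msgs := by
  induction msgs with
  | nil =>
      intro steps cur
      simp only [List.foldl_nil, gRun]
      cases h : cur.isEmpty <;> simp [h]
  | cons m rest ih =>
      intro steps cur
      simp only [List.foldl_cons, gRun]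
      cases h : pvIsUser m <;> simp only [h, if_false, if_true, Bool.false_eq_true]
      · exact ih steps (cur ++ [m])
      · rw [ih (steps ++ [cur ++ [m]]) []]
        simp

theorem A_eq_gRun (msgs : List (List (String × String)))
    : messages_to_steps_py msgs = gRun [] msgs := by
  have := A_foldl_eq msgs [] []
  simpa [messages_to_steps_py] using this

-- ---- B side ----

-- drop/take form of the slice the B port takes.
def dt (xs : List (List (String × String))) (a b : Nat) : List (List (String × String)) :=
  (xs.drop a).take (b - a)

-- the Nat-level fold of port B
def FB (xs : List (List (String × String))) (bs : List Nat)
    (st : List (List (List (String × String))) × Nat) : List (List (List (String × String))) × Nat :=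
  bs.foldl (fun st i => (st.1 ++ [dt xs st.2 (i + 1)], i + 1)) st

def BN (xs : List (List (String × String))) : List (List (List (String × String))) :=
  let st := FB xs (pvBoundaries xs 0) ([], 0)
  if st.2 < xs.length then st.1 ++ [xs.drop st.2] else st.1

-- Port B computes BN (slices rewritten to drop/take).
theorem alt_eq_BN (xs : List (List (String × String))) : messages_to_steps_py_alt xs = BN xs := by
  have hstep : (fun (st : List (List (List (String × String))) × Nat) (i : Nat) =>
      (st.1 ++ [PySem.List.slice xs (some (st.2 : Int)) (some ((i : Int) + 1))], i + 1))
      = (fun st i => (st.1 ++ [dt xs st.2 (i + 1)], i + 1)) := by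
    funext st i
    have : ((i : Int) + 1) = (((i + 1 : Nat) : Int)) := by push_cast; ring
    rw [this, PySem.List.slice_natCast]
    rfl
  simp only [messages_to_steps_py_alt, BN, FB, hstep, PySem.List.slice_from_natCast]

-- boundaries with a shifted start are the shifted boundaries.
theorem bnd_step (m : List (String × String)) (rest : List (List (String × String))) (t : Int)
    : pvBoundaries (m :: rest) t
      = (if pvIsUser m then [t.toNat] else []) ++ pvBoundaries rest (t + 1) := by
  simp only [pvBoundaries, PySem.List.enumerate_cons, List.filterMap_cons]
  cases pvIsUser m <;> simp

theorem bnd_shift (xs : List (List (String × String)))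
    : ∀ s : Nat, pvBoundaries xs (s : Int) = (pvBoundaries xs 0).map (· + s) := by
  induction xs with
  | nil => intro s; simp [pvBoundaries, PySem.List.enumerate_nil]
  | cons m rest ih =>
      intro s
      rw [bnd_step m rest (s : Int), bnd_step m rest 0,
          show ((s : Int) + 1) = (((s + 1 : Nat) : Int)) by push_cast; ring, ih (s + 1),
          show ((0 : Int) + 1) = (((1 : Nat) : Int)) by norm_num, ih 1]
      have hmap : ((pvBoundaries rest 0).map (· + 1)).map (· + s)
          = (pvBoundaries rest 0).map (· + (s + 1)) := by
        rw [List.map_map]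
        exact List.map_congr_left (fun x _ => by simp only [Function.comp_apply]; omega)
      cases h : pvIsUser m <;>
        simp [h, hmap]

theorem bnd_cons (m : List (String × String)) (rest : List (List (String × String)))
    : pvBoundaries (m :: rest) 0
      = (if pvIsUser m then [0] else []) ++ (pvBoundaries rest 0).map (· + 1) := by
  rw [bnd_step m rest 0, show ((0 : Int) + 1) = (((1 : Nat) : Int)) by norm_num,
      bnd_shift rest 1]
  rfl

-- the fold only appends to the first component.
theorem FB_acc (xs : List (List (String × String))) (bs : List Nat)
    : ∀ (steps : List (List (List (String × String)))) (s : Nat),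
      FB xs bs (steps, s) = (steps ++ (FB xs bs ([], s)).1, (FB xs bs ([], s)).2) := by
  induction bs with
  | nil => intro steps s; simp [FB]
  | cons i bs ih =>
      intro steps s
      simp only [FB, List.foldl_cons, List.nil_append] at *
      rw [ih (steps ++ [dt xs s (i + 1)]) (i + 1), ih [dt xs s (i + 1)] (i + 1)]
      simp

-- slicing a cons at shifted indices.
theorem dt_cons (m : List (String × String)) (xs : List (List (String × String))) (a b : Nat)
    : dt (m :: xs) (a + 1) (b + 1) = dt xs a b := by
  simp [dt, Nat.succ_sub_succ]

-- shift lemma: folding the (+1)-shifted boundaries over (m :: xs) from start s+1.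
theorem FB_shift (m : List (String × String)) (xs : List (List (String × String))) (bs : List Nat)
    : ∀ (steps : List (List (List (String × String)))) (s : Nat),
      FB (m :: xs) (bs.map (· + 1)) (steps, s + 1)
      = ((FB xs bs (steps, s)).1, (FB xs bs (steps, s)).2 + 1) := by
  induction bs with
  | nil => intro steps s; simp [FB]
  | cons i bs ih =>
      intro steps s
      simp only [FB, List.map_cons, List.foldl_cons] at *
      rw [dt_cons m xs s (i + 1)]
      exact ih (steps ++ [dt xs s (i + 1)]) (i + 1)

theorem consOnto_single (a : List (List (String × String))) (m : List (String × String))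
    (l : List (List (List (String × String))))
    : consOnto a (consOnto [m] l) = consOnto (a ++ [m]) l := by
  cases l with
  | nil =>
      have h1 : (([m] : List (List (String × String))).isEmpty) = false := by simp
      have h2 : ((a ++ [m]).isEmpty) = false := by
        cases a <;> simp [List.isEmpty]
      simp [consOnto, h1, h2]
  | cons g gs => simp [consOnto, List.append_assoc]

theorem gRun_consOnto (xs : List (List (String × String)))
    : ∀ cur, gRun cur xs = consOnto cur (gRun [] xs) := by
  induction xs with
  | nil => intro cur; simp [gRun, consOnto]
  | cons m rest ih =>
      intro cur
      simp only [gRun]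
      cases h : pvIsUser m
      · simp only [h, Bool.false_eq_true, if_false]
        rw [List.nil_append] <;> rw [ ih (cur ++ [m]), ih [m], consOnto_single cur m]
      · simp [h, consOnto]

theorem BN_cons_user (m : List (String × String)) (rest : List (List (String × String)))
    (h : pvIsUser m = true) : BN (m :: rest) = [m] :: BN rest := by
  simp only [BN, bnd_cons, h, if_true, List.singleton_append]
  show (let st := FB (m :: rest) (0 :: (pvBoundaries rest 0).map (· + 1)) ([], 0); _) = _
  have h1 : FB (m :: rest) (0 :: (pvBoundaries rest 0).map (· + 1)) ([], 0)
      = FB (m :: rest) ((pvBoundaries rest 0).map (· + 1)) ([[m]], 0 + 1) := by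
    simp [FB, dt]
  rw [h1, FB_shift m rest (pvBoundaries rest 0) [[m]] 0,
      FB_acc rest (pvBoundaries rest 0) [[m]] 0]
  simp only [List.length_cons, List.drop_succ_cons, Nat.add_lt_add_iff_right,
    List.singleton_append]
  split <;> rfl

theorem BN_cons_non (m : List (String × String)) (rest : List (List (String × String)))
    (h : pvIsUser m = false) : BN (m :: rest) = consOnto [m] (BN rest) := by
  simp only [BN, bnd_cons, h, Bool.false_eq_true, if_false, List.nil_append]
  cases hb : pvBoundaries rest 0 with
  | nil =>
      simp only [List.map_nil, FB, List.foldl_nil, List.length_cons, List.drop_zero]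
      cases rest with
      | nil => simp [consOnto]
      | cons r rs => simp [consOnto]
  | cons j bs =>
      have hdt : dt (m :: rest) 0 (j + 1 + 1) = m :: dt rest 0 (j + 1) := by
        simp [dt]
      have h1 : FB (m :: rest) ((j :: bs).map (· + 1)) ([], 0)
          = FB (m :: rest) (bs.map (· + 1)) ([m :: dt rest 0 (j + 1)], j + 1 + 1) := by
        simp [FB, hdt]
      have h2 : FB rest (j :: bs) ([], 0) = FB rest bs ([dt rest 0 (j + 1)], j + 1) := by
        simp [FB]
      rw [h1, FB_shift m rest bs [m :: dt rest 0 (j + 1)] (j + 1), h2,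
          FB_acc rest bs [m :: dt rest 0 (j + 1)] (j + 1),
          FB_acc rest bs [dt rest 0 (j + 1)] (j + 1)]
      simp only [List.length_cons, List.drop_succ_cons, Nat.add_lt_add_iff_right,
        List.singleton_append, List.cons_append]
      split <;> simp [consOnto]

theorem BN_eq_gRun (xs : List (List (String × String))) : BN xs = gRun [] xs := by
  induction xs with
  | nil => simp [BN, FB, pvBoundaries, PySem.List.enumerate_nil, gRun]
  | cons m rest ih =>
      cases h : pvIsUser m
      · rw [BN_cons_non m rest h, ih]
        simp only [gRun, h, Bool.false_eq_true, if_false, List.nil_append]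
        rw [gRun_consOnto rest [m]]
      · rw [BN_cons_user m rest h, ih]
        simp [gRun, h]

theorem B_eq_gRun (xs : List (List (String × String))) : messages_to_steps_py_alt xs = gRun [] xs := by
  rw [alt_eq_BN]; exact BN_eq_gRun xs

-- ===== VERDICT (by name: the statement is the Claim_ definition above) =====
theorem messages_to_steps_py_spec : Claim_equal_messages_to_steps_py := by
  intro messages _ _
  show messages_to_steps_py messages = messages_to_steps_py_alt messages
  rw [A_eq_gRun, B_eq_gRun]
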